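-- pv_equiv track=rewrite | github.com/Edoardo-Manenti/AOC_2024 | day_07/aoc.py | rec
-- ===== SOURCE A (Python) =====
-- def rec(target, current, numbers, length, with_concat=False):
--     if len(numbers) == 1:
--         result = set([])
--         result.add(current+numbers[0])
--         result.add(current*numbers[0])
--         if with_concat:
--             result.add(int(str(numbers[0]) + str(current)))
--         return result
--     else:
--         result = rec(target, numbers[0], numbers[1:], length, with_concat)
--         new_result = set([])
--         for r in list(result):
--             new_result.add(current+r)
--             new_result.add(current*r)
--             if with_concat:
--                 new_result.add(int(str(r) + str(current)))
--         return new_result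
-- ===== SOURCE B (Python) =====
-- def rec(target, current, numbers, length, with_concat=False):
--     def combine(x, s):
--         out = set()
--         for y in s:
--             out.add(x + y)
--             out.add(x * y)
--             if with_concat:
--                 out.add(int(str(y) + str(x)))
--         return out
--     acc = {numbers[-1]}
--     for x in reversed(numbers[:-1]):
--         acc = combine(x, acc)
--     return combine(current, acc)
-- ===== Notes on version B (the rewrite author's own statement) =====
-- stated objective: simpler
-- what changed: The linear recursion is rewritten as an explicit iterative right-fold: seed the set with the last number, loop over reversed(numbers[:-1]) applying one inline combine step, and finally combine `current`; no recursion and no list slicing per level.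
import Mathlib
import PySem

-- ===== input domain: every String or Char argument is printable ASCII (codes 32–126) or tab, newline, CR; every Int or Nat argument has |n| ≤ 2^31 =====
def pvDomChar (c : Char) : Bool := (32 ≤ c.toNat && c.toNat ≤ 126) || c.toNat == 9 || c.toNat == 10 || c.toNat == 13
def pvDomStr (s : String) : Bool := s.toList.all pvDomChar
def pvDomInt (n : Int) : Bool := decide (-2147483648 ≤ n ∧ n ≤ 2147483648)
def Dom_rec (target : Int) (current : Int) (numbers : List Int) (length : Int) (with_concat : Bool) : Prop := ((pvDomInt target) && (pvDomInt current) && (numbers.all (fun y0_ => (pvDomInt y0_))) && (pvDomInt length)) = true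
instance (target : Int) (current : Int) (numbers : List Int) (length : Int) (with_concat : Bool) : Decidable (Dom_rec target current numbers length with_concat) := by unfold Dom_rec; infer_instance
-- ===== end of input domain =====

-- B rewrites the linear recursion as an explicit iterative right-fold (simpler decomposition);
-- return-value equivalence only; both versions raise outside Pre_rec.

-- int(str(r) + str(current)): exact via PySem.Int.ofStr?; the `.getD 0` default is only
-- reached where Python raises ValueError, which Pre_rec excludes.
def pvConcat (r : Int) (c : Int) : Int :=
  (PySem.Int.ofStr? (PySem.Int.toStr r ++ PySem.Int.toStr c)).getD 0

-- ===== PORT A =====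
def rec (target : Int) (current : Int) (numbers : List Int) (length : Int) (with_concat : Bool) : List Int :=
  match numbers with
  | [] => []  -- unreachable: Python raises IndexError on numbers[0]; excluded by Pre_rec
  | [n0] =>
      let result : PySem.Set Int := PySem.Set.ofList []
      let result := PySem.Set.add result (current + n0)
      let result := PySem.Set.add result (current * n0)
      if with_concat then PySem.Set.add result (pvConcat n0 current) else result
  | n0 :: n1 :: rest =>
      let result := rec target n0 (n1 :: rest) length with_concat
      result.foldl (fun new_result r =>
        let new_result := PySem.Set.add new_result (current + r)
        let new_result := PySem.Set.add new_result (current * r)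
        if with_concat then PySem.Set.add new_result (pvConcat r current) else new_result)
        (PySem.Set.ofList [])

-- ===== PORT B =====
-- one combine step of Source B's loop: fold x into the current set
def pvCombine (with_concat : Bool) (x : Int) (s : PySem.Set Int) : PySem.Set Int :=
  s.foldl (fun out y =>
    let out := PySem.Set.add out (x + y)
    let out := PySem.Set.add out (x * y)
    if with_concat then PySem.Set.add out (pvConcat y x) else out)
    (PySem.Set.ofList [])

def rec_alt (target : Int) (current : Int) (numbers : List Int) (length : Int) (with_concat : Bool) : List Int :=
  match numbers.reverse with
  | [] => []  -- unreachable: Python raises IndexError on numbers[-1]; excluded by Pre_rec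
  | lastN :: restRev =>
      let acc := restRev.foldl (fun acc x => pvCombine with_concat x acc)
                   (PySem.Set.add (PySem.Set.ofList []) lastN)
      pvCombine with_concat current acc

-- ===== PRECONDITION & SPEC =====
-- Pre_rec excludes exactly the inputs where A raises: numbers = [] (IndexError), and
-- with_concat with a negative `current` or a negative element of numbers[:-1]
-- (int(str(r)+str(current)) gets a '-' mid-string: ValueError). B raises on the same inputs.
def Pre_rec (target : Int) (current : Int) (numbers : List Int) (length : Int) (with_concat : Bool) : Prop :=
  numbers ≠ [] ∧ (with_concat = true → 0 ≤ current ∧ ∀ x ∈ numbers.dropLast, 0 ≤ x)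
instance (target : Int) (current : Int) (numbers : List Int) (length : Int) (with_concat : Bool) : Decidable (Pre_rec target current numbers length with_concat) := by unfold Pre_rec; infer_instance

def pvWitness_rec : Int × Int × List Int × Int × Bool := (190, 10, [19, 3], 2, true)

def Spec_rec (target : Int) (current : Int) (numbers : List Int) (length : Int) (with_concat : Bool) (out : List Int) : Prop := out = rec_alt target current numbers length with_concat
instance (target : Int) (current : Int) (numbers : List Int) (length : Int) (with_concat : Bool) (out : List Int) : Decidable (Spec_rec target current numbers length with_concat out) := by unfold Spec_rec; infer_instance

-- ===== CLAIM (what is proved, stated in full; the proofs are below) =====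
def Claim_equal_rec : Prop := ∀ (target : Int) (current : Int) (numbers : List Int) (length : Int) (with_concat : Bool), Dom_rec target current numbers length with_concat → Pre_rec target current numbers length with_concat → Spec_rec target current numbers length with_concat (rec target current numbers length with_concat)

-- ===== LEMMAS AND PROOFS =====

-- the value both ports fold `current` into: the innermost-to-outermost right fold over numbers
def pvInner (with_concat : Bool) : List Int → PySem.Set Int
  | [] => []
  | [x] => PySem.Set.add (PySem.Set.ofList []) x
  | x :: y :: rest => pvCombine with_concat x (pvInner with_concat (y :: rest))

theorem rec_eq_combine_inner (target current : Int) (numbers : List Int) (length : Int)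
    (with_concat : Bool) (h : numbers ≠ []) :
    rec target current numbers length with_concat
      = pvCombine with_concat current (pvInner with_concat numbers) := by
  induction numbers generalizing current with
  | nil => exact absurd rfl h
  | cons n0 rest ih =>
      cases rest with
      | nil =>
          simp [rec, pvCombine, pvInner, List.foldl, PySem.Set.ofList]
      | cons n1 rest' =>
          simp only [rec, pvInner]
          rw [ih n0 (by simp)]
          rfl

theorem pvInner_cons (with_concat : Bool) (x : Int) (l : List Int) (h : l ≠ []) :
    pvInner with_concat (x :: l) = pvCombine with_concat x (pvInner with_concat l) := by
  cases l with
  | nil => exact absurd rfl h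
  | cons y ys => rfl

theorem foldl_combine_inner (with_concat : Bool) (xs l : List Int) (h : l ≠ []) :
    xs.foldl (fun acc x => pvCombine with_concat x acc) (pvInner with_concat l)
      = pvInner with_concat (xs.reverse ++ l) := by
  induction xs generalizing l with
  | nil => simp
  | cons x xs ih =>
      simp only [List.foldl, List.reverse_cons, List.append_assoc, List.singleton_append]
      rw [← pvInner_cons with_concat x l h, ih (x :: l) (by simp)]

theorem rec_alt_eq_combine_inner (target current : Int) (numbers : List Int) (length : Int)
    (with_concat : Bool) (h : numbers ≠ []) :
    rec_alt target current numbers length with_concat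
      = pvCombine with_concat current (pvInner with_concat numbers) := by
  obtain ⟨lastN, restRev, hrev⟩ : ∃ a l, numbers.reverse = a :: l := by
    cases hn : numbers.reverse with
    | nil => exact absurd (by simpa using hn) h
    | cons a l => exact ⟨a, l, rfl⟩
  have hnum : numbers = restRev.reverse ++ [lastN] := by
    have := congrArg List.reverse hrev
    simpa using this
  simp only [rec_alt, hrev]
  rw [show PySem.Set.add (PySem.Set.ofList []) lastN = pvInner with_concat [lastN] from rfl,
      foldl_combine_inner with_concat restRev [lastN] (by simp), ← hnum]

-- ===== VERDICT (by name: the statement is the Claim_ definition above) =====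
theorem rec_spec : Claim_equal_rec := by
  intro target current numbers length with_concat _hDom hPre
  unfold Spec_rec
  rw [rec_eq_combine_inner target current numbers length with_concat hPre.1,
      rec_alt_eq_combine_inner target current numbers length with_concat hPre.1]
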